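-- pv_equiv track=rewrite | github.com/Rupthuz/Battleship-PT3-main | run.py | check_ok
-- ===== SOURCE A (Python) =====
-- def check_ok(boat, taken):
--     boat.sort()
--     for i in range(len(boat)):
--         num = boat[i]
--         if num in taken:
--             boat = [-1]
--             break
--         elif num < 0 or num > 99:
--             boat = [-1]
--             break
--         elif num % 10 == 9 and i < len(boat) - 1:
--             if boat[i + 1] % 10 == 0:
--                 boat = [-1]
--                 break
--         if i != 0:
--             if boat[i] != boat[i - 1] + 1 and boat[i] != boat[i - 1] + 10:
--                 boat = [-1]
--                 break
--
--     return boat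
-- ===== SOURCE B (Python) =====
-- def check_ok(boat, taken):
--     # Valid iff the sorted cells form a chain of grid neighbours (right or down
--     # on the 10x10 board) staying on the board and avoiding the taken set.
--     boat.sort()
--     bad = set(taken)
--
--     def walk(cells, prev):
--         if not cells:
--             return True
--         (r, c), rest = cells[0], cells[1:]
--         if r < 0 or r > 9 or 10 * r + c in bad:
--             return False
--         if prev is not None and (r, c) != (prev[0], prev[1] + 1) and (r, c) != (prev[0] + 1, prev[1]):
--             return False
--         return walk(rest, (r, c))
--
--     return boat if walk([divmod(n, 10) for n in boat], None) else [-1]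
-- ===== Notes on version B (the rewrite author's own statement) =====
-- stated objective: alternative
-- what changed: A's index walk with breaks, boat[i-1]/boat[i+1] lookups and an explicit % 10 row-wrap rule is replaced by a grid view: cells are mapped to (row, col) pairs via divmod, taken becomes a set, and a recursive walk threads the previous coordinate, accepting only right- or down-neighbours on the 10x10 board (the wrap rule is absorbed into coordinate adjacency).
import Mathlib
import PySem

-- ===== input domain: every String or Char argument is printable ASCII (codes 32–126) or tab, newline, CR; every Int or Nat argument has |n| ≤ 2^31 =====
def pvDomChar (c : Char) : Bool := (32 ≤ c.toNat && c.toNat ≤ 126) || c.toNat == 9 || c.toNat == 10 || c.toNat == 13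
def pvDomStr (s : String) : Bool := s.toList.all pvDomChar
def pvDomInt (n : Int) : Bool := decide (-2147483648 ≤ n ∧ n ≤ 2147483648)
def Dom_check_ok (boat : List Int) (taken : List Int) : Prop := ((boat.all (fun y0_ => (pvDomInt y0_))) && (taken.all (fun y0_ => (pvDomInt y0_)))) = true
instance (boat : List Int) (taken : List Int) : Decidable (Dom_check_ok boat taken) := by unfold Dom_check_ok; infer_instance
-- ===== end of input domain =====

-- B replaces A's modulo-and-break index walk by a grid view: cells become (row, col) pairs via divmod,
-- `taken` becomes a set, and a recursive walk checks each cell is on the board, free, and a right- or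
-- down-neighbour of the previous one (the wrap rule disappears into the coordinate adjacency). Same cost.
-- Both Pythons sort `boat` in place; the equivalence proved here is about the return value (the side effect is identical).

-- ===== PORT A =====
-- A's for-loop over range(len(boat)) with break: recursion on the remaining iteration count d
-- (called with d = len(boat), so d is exactly the loop's iteration budget; accesses use getD, total
-- because every access is guarded by i < len as in Python).
def check_ok_loop (s taken : List Int) : Nat → Nat → List Int
  | 0, _ => s
  | d+1, i =>
    if i < s.length then
      let num := s.getD i 0
      if taken.contains num then [-1]
      else if num < 0 ∨ num > 99 then [-1]
      else if PySem.Int.mod num 10 = 9 ∧ i < s.length - 1 then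
        if PySem.Int.mod (s.getD (i+1) 0) 10 = 0 then [-1]
        else if i ≠ 0 then
          if s.getD i 0 ≠ s.getD (i-1) 0 + 1 ∧ s.getD i 0 ≠ s.getD (i-1) 0 + 10 then [-1]
          else check_ok_loop s taken d (i+1)
        else check_ok_loop s taken d (i+1)
      else if i ≠ 0 then
        if s.getD i 0 ≠ s.getD (i-1) 0 + 1 ∧ s.getD i 0 ≠ s.getD (i-1) 0 + 10 then [-1]
        else check_ok_loop s taken d (i+1)
      else check_ok_loop s taken d (i+1)
    else s

def check_ok (boat : List Int) (taken : List Int) : List Int :=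
  let s := PySem.List.sorted boat (fun x => x) false
  check_ok_loop s taken s.length 0

-- ===== PORT B =====
-- Source B's inner recursion `walk(cells, prev)` over the (row, col) pairs.
def walk (bad : PySem.Set Int) : List (Int × Int) → Option (Int × Int) → Bool
  | [], _ => true
  | rc :: rest, prev =>
    if rc.1 < 0 ∨ rc.1 > 9 ∨ PySem.Set.contains bad (10 * rc.1 + rc.2) = true then false
    else
      match prev with
      | some p =>
        if rc ≠ (p.1, p.2 + 1) ∧ rc ≠ (p.1 + 1, p.2) then false
        else walk bad rest (some rc)
      | none => walk bad rest (some rc)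

def check_ok_alt (boat : List Int) (taken : List Int) : List Int :=
  let s := PySem.List.sorted boat (fun x => x) false
  let bad := PySem.Set.ofList taken
  -- divmod(n, 10) = (floordiv n 10, mod n 10)  (exact: PySem floor semantics)
  if walk bad (s.map fun n => (PySem.Int.floordiv n 10, PySem.Int.mod n 10)) none then s else [-1]

-- ===== PRECONDITION & SPEC =====
def Spec_check_ok (boat : List Int) (taken : List Int) (out : List Int) : Prop := out = check_ok_alt boat taken
instance (boat : List Int) (taken : List Int) (out : List Int) : Decidable (Spec_check_ok boat taken out) := by unfold Spec_check_ok; infer_instance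

-- ===== CLAIM (what is proved, stated in full; the proofs are below) =====
def Claim_equal_check_ok : Prop := ∀ (boat : List Int) (taken : List Int), Dom_check_ok boat taken → Spec_check_ok boat taken (check_ok boat taken)

-- ===== LEMMAS AND PROOFS =====

-- what A's chain of checks demands of position j (proof-only helper)
abbrev okAt (s taken : List Int) (j : Nat) : Prop :=
  s.getD j 0 ∉ taken ∧ 0 ≤ s.getD j 0 ∧ s.getD j 0 ≤ 99 ∧
  (j + 1 < s.length → ¬(PySem.Int.mod (s.getD j 0) 10 = 9 ∧ PySem.Int.mod (s.getD (j+1) 0) 10 = 0)) ∧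
  (j ≠ 0 → (s.getD j 0 = s.getD (j-1) 0 + 1 ∨ s.getD j 0 = s.getD (j-1) 0 + 10))

-- B-side proof helpers: grid adjacency, the per-cell condition, and the prev-threaded chain
abbrev adjC (p q : Int × Int) : Prop := q = (p.1, p.2 + 1) ∨ q = (p.1 + 1, p.2)

abbrev cellP (bad : PySem.Set Int) (rc : Int × Int) : Prop :=
  ¬(rc.1 < 0 ∨ rc.1 > 9 ∨ PySem.Set.contains bad (10 * rc.1 + rc.2) = true)

def chainP : Option (Int × Int) → List (Int × Int) → Prop
  | _, [] => True
  | prev, rc :: rest => (∀ p, prev = some p → adjC p rc) ∧ chainP (some rc) rest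

theorem ite_iff_congr {α : Type} {c d : Prop} {ic : Decidable c} {id : Decidable d}
    (h : c ↔ d) (a b : α) : (@ite α c ic a b) = (@ite α d id a b) := by
  cases ic with
  | isTrue hc => rw [if_pos hc, if_pos (h.mp hc)]
  | isFalse hc => rw [if_neg hc, if_neg (fun hd => hc (h.mpr hd))]

theorem forall_from_succ {n i : Nat} {P : Nat → Prop} (hi : i < n) :
    (∀ j, j < n → i ≤ j → P j) ↔ (P i ∧ ∀ j, j < n → i + 1 ≤ j → P j) := by
  constructor
  · intro h; exact ⟨h i hi le_rfl, fun j hj hij => h j hj (by omega)⟩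
  · rintro ⟨hp, h⟩ j hj hij
    rcases Nat.eq_or_lt_of_le hij with rfl | hlt
    · exact hp
    · exact h j hj hlt

theorem loop_eq (s taken : List Int) : ∀ (d i : Nat), s.length - i ≤ d →
    check_ok_loop s taken d i =
      @ite (List Int) (∀ j, j < s.length → i ≤ j → okAt s taken j) (Nat.decidableBallLT _ _) s [-1] := by
  intro d
  induction d with
  | zero =>
    intro i hd
    rw [check_ok_loop,
      if_pos (show ∀ j, j < s.length → i ≤ j → okAt s taken j from fun j hj hij => absurd hj (by omega))]
  | succ d ih =>
    intro i hd
    by_cases hi : i < s.length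
    · rw [check_ok_loop, if_pos hi]
      refine Eq.trans ?_
        (@ite_iff_congr (List Int) _ _ (instDecidableAnd (dq := Nat.decidableBallLT _ _))
          (Nat.decidableBallLT _ _) (forall_from_succ hi).symm s [-1])
      have hrec := ih (i+1) (by omega)
      by_cases h1 : taken.contains (s.getD i 0)
      · simp only [h1, if_true]
        rw [if_neg]; rintro ⟨hok, -⟩
        exact hok.1 (by simpa using h1)
      · simp only [h1, Bool.false_eq_true, if_false]
        by_cases h2 : s.getD i 0 < 0 ∨ s.getD i 0 > 99
        · rw [if_pos h2, if_neg]; rintro ⟨hok, -⟩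
          have hle := hok.2.1; have hge := hok.2.2.1
          omega
        · rw [if_neg h2]
          push Not at h2
          have hadj :
              (if i ≠ 0 then
                if s.getD i 0 ≠ s.getD (i-1) 0 + 1 ∧ s.getD i 0 ≠ s.getD (i-1) 0 + 10 then [-1]
                else check_ok_loop s taken d (i+1)
              else check_ok_loop s taken d (i+1)) =
              @ite (List Int) ((i ≠ 0 → (s.getD i 0 = s.getD (i-1) 0 + 1 ∨ s.getD i 0 = s.getD (i-1) 0 + 10))
                  ∧ ∀ j, j < s.length → i + 1 ≤ j → okAt s taken j)
                (instDecidableAnd (dq := Nat.decidableBallLT _ _)) s [-1] := by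
            by_cases h0 : i ≠ 0
            · rw [if_pos h0]
              by_cases h4 : s.getD i 0 ≠ s.getD (i-1) 0 + 1 ∧ s.getD i 0 ≠ s.getD (i-1) 0 + 10
              · rw [if_pos h4, if_neg]
                rintro ⟨ha, -⟩
                rcases ha h0 with h | h <;> tauto
              · rw [if_neg h4, hrec]
                have hc : (i ≠ 0 → (s.getD i 0 = s.getD (i-1) 0 + 1 ∨ s.getD i 0 = s.getD (i-1) 0 + 10)) := by
                  intro _; tauto
                by_cases h5 : ∀ j, j < s.length → i + 1 ≤ j → okAt s taken j
                · rw [if_pos h5, if_pos ⟨hc, h5⟩]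
                · rw [if_neg h5, if_neg (by tauto)]
            · rw [if_neg h0, hrec]
              by_cases h5 : ∀ j, j < s.length → i + 1 ≤ j → okAt s taken j
              · rw [if_pos h5, if_pos ⟨by tauto, h5⟩]
              · rw [if_neg h5, if_neg (by tauto)]
          by_cases h3 : PySem.Int.mod (s.getD i 0) 10 = 9 ∧ i < s.length - 1
          · rw [if_pos h3]
            by_cases hw : PySem.Int.mod (s.getD (i+1) 0) 10 = 0
            · rw [if_pos hw, if_neg]
              rintro ⟨hok, -⟩
              exact hok.2.2.2.1 (by omega) ⟨h3.1, hw⟩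
            · rw [if_neg hw, hadj]
              have hokrest : s.getD i 0 ∉ taken ∧ 0 ≤ s.getD i 0 ∧ s.getD i 0 ≤ 99 ∧
                  (i + 1 < s.length → ¬(PySem.Int.mod (s.getD i 0) 10 = 9 ∧ PySem.Int.mod (s.getD (i+1) 0) 10 = 0)) := by
                refine ⟨by simpa using h1, h2.1, h2.2, ?_⟩
                rintro _ ⟨_, hc⟩; exact hw hc
              by_cases ha : (i ≠ 0 → (s.getD i 0 = s.getD (i-1) 0 + 1 ∨ s.getD i 0 = s.getD (i-1) 0 + 10))
              · by_cases h5 : ∀ j, j < s.length → i + 1 ≤ j → okAt s taken j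
                · rw [if_pos ⟨ha, h5⟩, if_pos ⟨⟨hokrest.1, hokrest.2.1, hokrest.2.2.1, hokrest.2.2.2, ha⟩, h5⟩]
                · rw [if_neg (by tauto), if_neg (by rintro ⟨-, hh⟩; exact h5 hh)]
              · rw [if_neg (by tauto), if_neg (by rintro ⟨⟨-, -, -, -, ha'⟩, -⟩; exact ha ha')]
          · rw [if_neg h3, hadj]
            have hw3 : (i + 1 < s.length → ¬(PySem.Int.mod (s.getD i 0) 10 = 9 ∧ PySem.Int.mod (s.getD (i+1) 0) 10 = 0)) := by
              rintro hlen ⟨h9, -⟩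
              exact h3 ⟨h9, by omega⟩
            have hokrest : s.getD i 0 ∉ taken ∧ 0 ≤ s.getD i 0 ∧ s.getD i 0 ≤ 99 :=
              ⟨by simpa using h1, h2.1, h2.2⟩
            by_cases ha : (i ≠ 0 → (s.getD i 0 = s.getD (i-1) 0 + 1 ∨ s.getD i 0 = s.getD (i-1) 0 + 10))
            · by_cases h5 : ∀ j, j < s.length → i + 1 ≤ j → okAt s taken j
              · rw [if_pos ⟨ha, h5⟩, if_pos ⟨⟨hokrest.1, hokrest.2.1, hokrest.2.2, hw3, ha⟩, h5⟩]
              · rw [if_neg (by tauto), if_neg (by rintro ⟨-, hh⟩; exact h5 hh)]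
            · rw [if_neg (by tauto), if_neg (by rintro ⟨⟨-, -, -, -, ha'⟩, -⟩; exact ha ha')]
    · rw [check_ok_loop, if_neg hi,
        if_pos (show ∀ j, j < s.length → i ≤ j → okAt s taken j from fun j hj hij => absurd hj (by omega))]

theorem walk_iff (bad : PySem.Set Int) : ∀ (l : List (Int × Int)) (prev : Option (Int × Int)),
    walk bad l prev = true ↔ (∀ rc ∈ l, cellP bad rc) ∧ chainP prev l := by
  intro l
  induction l with
  | nil => intro prev; simp [walk, chainP]
  | cons rc rest ih =>
    intro prev
    show (if rc.1 < 0 ∨ rc.1 > 9 ∨ PySem.Set.contains bad (10 * rc.1 + rc.2) = true then false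
      else
        match prev with
        | some p => if rc ≠ (p.1, p.2 + 1) ∧ rc ≠ (p.1 + 1, p.2) then false else walk bad rest (some rc)
        | none => walk bad rest (some rc)) = true ↔ _
    by_cases hc : rc.1 < 0 ∨ rc.1 > 9 ∨ PySem.Set.contains bad (10 * rc.1 + rc.2) = true
    · rw [if_pos hc]
      simp only [Bool.false_eq_true, false_iff, chainP]
      rintro ⟨hall, -⟩
      exact hall rc (List.mem_cons_self) hc
    · rw [if_neg hc]
      cases prev with
      | none =>
        rw [ih]
        simp only [chainP, List.forall_mem_cons]
        constructor
        · rintro ⟨h1, h2⟩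
          exact ⟨⟨hc, h1⟩, fun p hp => by simp at hp, h2⟩
        · rintro ⟨⟨-, h1⟩, -, h2⟩
          exact ⟨h1, h2⟩
      | some p =>
        show (if rc ≠ (p.1, p.2 + 1) ∧ rc ≠ (p.1 + 1, p.2) then false else walk bad rest (some rc)) = true ↔ _
        by_cases hadj : rc ≠ (p.1, p.2 + 1) ∧ rc ≠ (p.1 + 1, p.2)
        · rw [if_pos hadj]
          simp only [Bool.false_eq_true, false_iff, chainP]
          rintro ⟨-, hprev, -⟩
          rcases hprev p rfl with h | h
          · exact hadj.1 h
          · exact hadj.2 h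
        · rw [if_neg hadj, ih]
          simp only [chainP, List.forall_mem_cons]
          constructor
          · rintro ⟨h1, h2⟩
            refine ⟨⟨hc, h1⟩, ?_, h2⟩
            rintro q hq
            injection hq with hq; subst hq
            by_cases he : rc = (p.1, p.2 + 1)
            · exact Or.inl he
            · exact Or.inr (by tauto)
          · rintro ⟨⟨-, h1⟩, -, h2⟩
            exact ⟨h1, h2⟩

theorem chainP_iff : ∀ (l : List (Int × Int)) (prev : Option (Int × Int)),
    chainP prev l ↔ ((∀ p, prev = some p → ∀ h : 0 < l.length, adjC p l[0]) ∧
      ∀ j, (h : j + 1 < l.length) → adjC l[j] l[j+1]) := by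
  intro l
  induction l with
  | nil => intro prev; simp [chainP]
  | cons rc rest ih =>
    intro prev
    rw [chainP, ih]
    constructor
    · rintro ⟨h1, h2, h3⟩
      refine ⟨fun p hp _ => h1 p hp, ?_⟩
      intro j hj
      cases j with
      | zero =>
        simp only [List.length_cons] at hj
        have := h2 rc rfl (by simpa using hj)
        simpa using this
      | succ k =>
        simp only [List.length_cons] at hj
        have := h3 k (by omega)
        simpa using this
    · rintro ⟨h1, h2⟩
      refine ⟨fun p hp => h1 p hp (by simp), ?_, ?_⟩
      · intro p hp hlen
        injection hp with hp; subst hp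
        have := h2 0 (by simpa using hlen)
        simpa using this
      · intro j hj
        have := h2 (j+1) (by simpa using hj)
        simpa using this

theorem cell_iff (taken : List Int) (n : Int) :
    cellP (PySem.Set.ofList taken) (PySem.Int.floordiv n 10, PySem.Int.mod n 10) ↔
      (n ∉ taken ∧ 0 ≤ n ∧ n ≤ 99) := by
  have hdm := PySem.Int.floordiv_mul_add_mod n 10
  have h0 : 0 ≤ PySem.Int.mod n 10 := PySem.Int.mod_nonneg n (b := 10) (by norm_num)
  have h1 : PySem.Int.mod n 10 < 10 := PySem.Int.mod_lt n (b := 10) (by norm_num)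
  have heq : 10 * PySem.Int.floordiv n 10 + PySem.Int.mod n 10 = n := by linarith
  simp only [cellP, heq, PySem.Set.contains, PySem.Set.mem_ofList, List.contains_eq_mem,
    decide_eq_true_eq]
  by_cases hm : n ∈ taken
  · simp [hm]
  · simp only [hm, or_false, not_or, not_lt, not_false_eq_true, true_and]
    constructor <;> intro <;> omega

theorem adj_iff (a b : Int) (_ha0 : 0 ≤ a) (_ha9 : a ≤ 99) (_hb0 : 0 ≤ b) (_hb9 : b ≤ 99) :
    adjC (PySem.Int.floordiv a 10, PySem.Int.mod a 10) (PySem.Int.floordiv b 10, PySem.Int.mod b 10) ↔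
      ((b = a + 1 ∨ b = a + 10) ∧ ¬(PySem.Int.mod a 10 = 9 ∧ PySem.Int.mod b 10 = 0)) := by
  rw [PySem.Int.floordiv_eq_ediv_of_pos (by norm_num), PySem.Int.floordiv_eq_ediv_of_pos (by norm_num),
    PySem.Int.mod_eq_emod_of_pos (by norm_num), PySem.Int.mod_eq_emod_of_pos (by norm_num)]
  simp only [adjC, Prod.mk.injEq]
  omega

theorem cond_iff (s taken : List Int) :
    ((∀ rc ∈ s.map fun n => (PySem.Int.floordiv n 10, PySem.Int.mod n 10),
        cellP (PySem.Set.ofList taken) rc) ∧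
      chainP none (s.map fun n => (PySem.Int.floordiv n 10, PySem.Int.mod n 10))) ↔
      (∀ j, j < s.length → okAt s taken j) := by
  rw [chainP_iff]
  simp only [List.forall_mem_map, List.length_map, List.getElem_map, reduceCtorEq,
    IsEmpty.forall_iff, forall_const, true_and]
  constructor
  · rintro ⟨h1, h2⟩ j hj
    have hgd : s.getD j 0 = s[j] := List.getD_eq_getElem s 0 hj
    obtain ⟨hnm, hle, hge⟩ := (cell_iff taken s[j]).1 (h1 s[j] (List.getElem_mem hj))
    refine ⟨by rwa [hgd], by rwa [hgd], by rwa [hgd], ?_, ?_⟩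
    · intro hj1
      obtain ⟨hnm', hle', hge'⟩ := (cell_iff taken (s[j+1]'hj1)).1 (h1 _ (List.getElem_mem hj1))
      have := ((adj_iff s[j] (s[j+1]'hj1) hle hge hle' hge').1 (h2 j hj1)).2
      rw [hgd, List.getD_eq_getElem s 0 hj1]
      exact this
    · intro h0
      obtain ⟨k, rfl⟩ : ∃ k, j = k + 1 := ⟨j - 1, by omega⟩
      obtain ⟨hnm', hle', hge'⟩ := (cell_iff taken (s[k]'(by omega))).1 (h1 _ (List.getElem_mem (by omega)))
      have := ((adj_iff (s[k]'(by omega)) (s[k+1]'hj) hle' hge' hle hge).1 (h2 k hj)).1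
      rw [hgd, show k + 1 - 1 = k from rfl, List.getD_eq_getElem s 0 (by omega)]
      exact this
  · intro H
    have hcell : ∀ n ∈ s, cellP (PySem.Set.ofList taken) (PySem.Int.floordiv n 10, PySem.Int.mod n 10) := by
      intro n hn
      obtain ⟨j, hj, rfl⟩ := List.mem_iff_getElem.1 hn
      obtain ⟨hnm, hle, hge, -, -⟩ := H j hj
      rw [List.getD_eq_getElem s 0 hj] at hnm hle hge
      exact (cell_iff taken _).2 ⟨hnm, hle, hge⟩
    refine ⟨hcell, ?_⟩
    intro j hj1
    obtain ⟨hnm, hle, hge, -, -⟩ := H j (by omega)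
    obtain ⟨hnm', hle', hge', -, -⟩ := H (j+1) hj1
    rw [List.getD_eq_getElem s 0 (by omega)] at hnm hle hge
    rw [List.getD_eq_getElem s 0 hj1] at hnm' hle' hge'
    refine (adj_iff (s[j]'(by omega)) (s[j+1]'hj1) hle hge hle' hge').2 ⟨?_, ?_⟩
    · obtain ⟨-, -, -, -, hstep⟩ := H (j+1) hj1
      have := hstep (by omega)
      rw [show j + 1 - 1 = j from rfl, List.getD_eq_getElem s 0 hj1,
        List.getD_eq_getElem s 0 (by omega)] at this
      exact this
    · obtain ⟨-, -, -, hwrap, -⟩ := H j (by omega)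
      have := hwrap hj1
      rw [List.getD_eq_getElem s 0 (show j < s.length by omega),
        List.getD_eq_getElem s 0 hj1] at this
      exact this

-- ===== VERDICT =====
theorem check_ok_spec : Claim_equal_check_ok := by
  intro boat taken _
  show check_ok boat taken = check_ok_alt boat taken
  unfold check_ok check_ok_alt
  set s := PySem.List.sorted boat (fun x => x) false with hs
  show check_ok_loop s taken s.length 0 =
    if walk (PySem.Set.ofList taken) (s.map fun n => (PySem.Int.floordiv n 10, PySem.Int.mod n 10)) none
    then s else [-1]
  rw [loop_eq s taken s.length 0 (by omega)]
  have hw : (walk (PySem.Set.ofList taken)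
      (s.map fun n => (PySem.Int.floordiv n 10, PySem.Int.mod n 10)) none = true) ↔
      ∀ j, j < s.length → okAt s taken j := by
    rw [walk_iff, cond_iff]
  by_cases hok : ∀ j, j < s.length → okAt s taken j
  · rw [if_pos (fun j hj _ => hok j hj), if_pos (hw.2 hok)]
  · rw [if_neg (fun h => hok fun j hj => h j hj (Nat.zero_le j)), if_neg (fun h => hok (hw.1 h))]
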